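-- pv_equiv track=rewrite | github.com/TaDpoleO/Python-Education | Yandex/Algorithm Training/Algorithm Training 5/Contest 2/B.py | answer
-- ===== SOURCE A (Python) =====
-- from collections import deque
--
-- def get_first_profit(numbers, K):
--     profit = 0
--
--     min_val = numbers[0]
--     for i in range(1, min(K, len(numbers))):
--         profit = max(profit, numbers[i]-min_val)
--         min_val = min(min_val, numbers[i])
--
--     return profit
--
-- def answer(numbers, N, K):
--     if len(numbers) < 2: return 0
--     if K >= N: return get_first_profit(numbers, K)
--
--     max_profit = get_first_profit(numbers, K)
--
--     stack = deque()
--     for i in range(K):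
--         while stack and numbers[stack[-1]] >= numbers[i]:
--             stack.pop()
--
--         stack.append(i)
--
--     for i in range(K, N):
--         while stack and numbers[stack[-1]] >= numbers[i]:
--             stack.pop()
--
--         while stack and (i-stack[0] > K):
--             stack.popleft()
--
--         stack.append(i)
--
--         max_profit = max(max_profit, numbers[i]-numbers[stack[0]])
--
--     return max_profit
-- ===== SOURCE B (Python) =====
-- def get_first_profit(numbers, K):
--     # best profit (never below 0) inside the first window, via direct prefix-min scans
--     return max([0] + [numbers[i] - min(numbers[:i])
--                       for i in range(1, min(K, len(numbers)))])
--
-- def answer(numbers, N, K):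
--     if len(numbers) < 2: return 0
--     if K >= N: return get_first_profit(numbers, K)
--     max_profit = get_first_profit(numbers, K)
--     for i in range(K, N):
--         max_profit = max(max_profit, numbers[i] - min(numbers[i-K:i+1]))
--     return max_profit
-- ===== Notes on version B (the rewrite author's own statement) =====
-- stated objective: simpler
-- what changed: B drops A's monotonic-deque machinery (the index deque and its two while-pop maintenance loops) and recomputes each window minimum directly with min() over the slice numbers[i-K:i+1], and likewise computes the first-window profit from prefix minima via min(numbers[:i]).
-- outside the precondition, e.g. on answer([1, 5, 2], 3, -1): A returns 0, B raises ValueError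
import Mathlib
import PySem

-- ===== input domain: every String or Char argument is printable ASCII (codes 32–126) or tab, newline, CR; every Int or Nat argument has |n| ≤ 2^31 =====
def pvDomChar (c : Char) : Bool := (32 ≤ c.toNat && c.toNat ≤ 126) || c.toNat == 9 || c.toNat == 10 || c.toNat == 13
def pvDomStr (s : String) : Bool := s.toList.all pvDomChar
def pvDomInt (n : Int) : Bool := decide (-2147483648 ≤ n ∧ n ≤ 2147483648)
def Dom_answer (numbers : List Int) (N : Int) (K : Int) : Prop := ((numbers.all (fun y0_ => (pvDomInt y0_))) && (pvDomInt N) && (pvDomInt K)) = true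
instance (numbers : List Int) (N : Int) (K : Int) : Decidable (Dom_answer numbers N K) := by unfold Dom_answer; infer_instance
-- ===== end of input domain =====

-- B replaces A's monotonic-deque window minimum by a direct min() over the window slice: simpler, at the cost of O(N*K) instead of A's O(N).
-- ===== PORT A =====

-- while stack and numbers[stack[-1]] >= numbers[i]: stack.pop()   (deque as a list, head = front)
def popBack (numbers : List Int) (x : Int) (st : List Int) : List Int :=
  match h : st.getLast? with
  | none => st
  | some j => if PySem.List.pyGetD numbers j 0 ≥ x then popBack numbers x st.dropLast else st
termination_by st.length
decreasing_by
  cases st with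
  | nil => simp at h
  | cons a t => simp [List.length_dropLast]

-- while stack and (i - stack[0] > K): stack.popleft()
def popFront (i K : Int) : List Int → List Int
  | [] => []
  | j :: rest => if i - j > K then popFront i K rest else j :: rest

-- first-loop body: pop back, append i
def stepFirst (numbers : List Int) (st : List Int) (i : Int) : List Int :=
  popBack numbers (PySem.List.pyGetD numbers i 0) st ++ [i]

-- second-loop body: pop back, pop front, append i, update max_profit with numbers[i] - numbers[stack[0]]
def stepMain (numbers : List Int) (K : Int) (s : List Int × Int) (i : Int) : List Int × Int :=
  let st := popFront i K (popBack numbers (PySem.List.pyGetD numbers i 0) s.1) ++ [i]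
  (st, max s.2 (PySem.List.pyGetD numbers i 0 - PySem.List.pyGetD numbers (st.headD 0) 0))

def getFirstProfit (numbers : List Int) (K : Int) : Int :=
  ((PySem.List.pyRange 1 (min K (numbers.length : Int)) 1).foldl
    (fun s i => (max s.1 (PySem.List.pyGetD numbers i 0 - s.2),
                 min s.2 (PySem.List.pyGetD numbers i 0)))
    (0, PySem.List.pyGetD numbers 0 0)).1

def answer (numbers : List Int) (N : Int) (K : Int) : Int :=
  if (numbers.length : Int) < 2 then 0
  else if K ≥ N then getFirstProfit numbers K
  else
    ((PySem.List.pyRange K N 1).foldl (stepMain numbers K)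
      ((PySem.List.pyRange 0 K 1).foldl (stepFirst numbers) [], getFirstProfit numbers K)).2

-- ===== PORT B =====

-- max([0] + [numbers[i] - min(numbers[:i]) for i in range(1, min(K, len(numbers)))])
def getFirstProfitAlt (numbers : List Int) (K : Int) : Int :=
  (PySem.List.max?
    (0 :: (PySem.List.pyRange 1 (min K (numbers.length : Int)) 1).map
      (fun i => PySem.List.pyGetD numbers i 0 -
        (PySem.List.min? (PySem.List.slice numbers none (some i)) (fun x => x)).getD 0))
    (fun x => x)).getD 0

def answer_alt (numbers : List Int) (N : Int) (K : Int) : Int :=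
  if (numbers.length : Int) < 2 then 0
  else if K ≥ N then getFirstProfitAlt numbers K
  else
    (PySem.List.pyRange K N 1).foldl
      (fun mp i => max mp (PySem.List.pyGetD numbers i 0 -
        (PySem.List.min? (PySem.List.slice numbers (some (i - K)) (some (i + 1))) (fun x => x)).getD 0))
      (getFirstProfitAlt numbers K)

-- ===== PRECONDITION & SPEC =====
-- Pre_ excludes (i) N > len(numbers) in the main branch, where A raises IndexError, and
-- (ii) K < 0 in the main branch, where A's negative-index wraparound happens to return 0
-- while B's min() of an empty window slice raises ValueError.
def Pre_answer (numbers : List Int) (N : Int) (K : Int) : Prop :=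
  (numbers.length : Int) < 2 ∨ K ≥ N ∨ (0 ≤ K ∧ N ≤ (numbers.length : Int))
instance (numbers : List Int) (N : Int) (K : Int) : Decidable (Pre_answer numbers N K) := by unfold Pre_answer; infer_instance

def pvWitness_answer : List Int × Int × Int := ([3, 1, 4, 1, 5], 5, 2)

def Spec_answer (numbers : List Int) (N : Int) (K : Int) (out : Int) : Prop := out = answer_alt numbers N K
instance (numbers : List Int) (N : Int) (K : Int) (out : Int) : Decidable (Spec_answer numbers N K out) := by unfold Spec_answer; infer_instance

-- ===== CLAIM (what is proved, stated in full; the proofs are below) =====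
def Claim_equal_answer : Prop := ∀ (numbers : List Int) (N : Int) (K : Int), Dom_answer numbers N K → Pre_answer numbers N K → Spec_answer numbers N K (answer numbers N K)

-- ===== LEMMAS AND PROOFS =====

-- numbers[m] for a proof-side index m
def G (numbers : List Int) (m : Int) : Int := PySem.List.pyGetD numbers m 0

-- the value Python's min(xs) returns is characterised by membership + being a lower bound
lemma min_unique (xs : List Int) (v : Int) (hv : v ∈ xs) (hlb : ∀ y ∈ xs, v ≤ y) :
    (PySem.List.min? xs (fun x => x)).getD 0 = v := by
  have hne : xs ≠ [] := List.ne_nil_of_mem hv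
  obtain ⟨w, hw⟩ : ∃ w, PySem.List.min? xs (fun x => x) = some w := by
    cases h : PySem.List.min? xs (fun x => x) with
    | none => exact absurd ((PySem.List.min?_eq_none_iff xs (fun x => x)).mp h) hne
    | some w => exact ⟨w, rfl⟩
  have hmem := PySem.List.min?_mem hw
  have hmin := PySem.List.min?_isMin hw
  rw [hw]
  exact le_antisymm (hmin v hv) (hlb w hmem)

lemma mem_slice_iff (numbers : List Int) (a b : Int) (ha : 0 ≤ a) (hab : a ≤ b)
    (hb : b < (numbers.length : Int)) (y : Int) :
    y ∈ PySem.List.slice numbers (some a) (some (b + 1)) ↔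
      ∃ m, a ≤ m ∧ m ≤ b ∧ y = G numbers m := by
  rw [PySem.List.slice_toNat numbers ha (by omega)]
  constructor
  · intro hy
    rw [List.mem_iff_getElem] at hy
    obtain ⟨k, hk, hval⟩ := hy
    simp only [List.length_take, List.length_drop, lt_min_iff] at hk
    rw [List.getElem_take, List.getElem_drop] at hval
    refine ⟨a + k, by omega, by omega, ?_⟩
    have h1 : (a + (k : Int)).toNat = a.toNat + k := by omega
    have h2 : a.toNat + k < numbers.length := by omega
    rw [G, PySem.List.pyGetD_eq_getElem numbers 0 (by omega) (by omega)]
    rw [← hval]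
    congr 1
    omega
  · rintro ⟨m, h1, h2, rfl⟩
    rw [List.mem_iff_getElem]
    have hlen : ((numbers.drop a.toNat).take ((b + 1).toNat - a.toNat)).length
        = min ((b + 1).toNat - a.toNat) (numbers.length - a.toNat) := by
      simp [List.length_take, List.length_drop]
    refine ⟨(m - a).toNat, by omega, ?_⟩
    rw [List.getElem_take, List.getElem_drop]
    rw [G, PySem.List.pyGetD_eq_getElem numbers 0 (by omega) (by omega)]
    congr 1
    omega

lemma mem_take_iff (numbers : List Int) (t : Int) (ht : t ≤ (numbers.length : Int)) (y : Int) :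
    y ∈ numbers.take t.toNat ↔ ∃ m, 0 ≤ m ∧ m < t ∧ y = G numbers m := by
  constructor
  · intro hy
    rw [List.mem_iff_getElem] at hy
    obtain ⟨k, hk, hval⟩ := hy
    simp only [List.length_take, lt_min_iff] at hk
    rw [List.getElem_take] at hval
    refine ⟨k, by omega, by omega, ?_⟩
    rw [G, PySem.List.pyGetD_eq_getElem numbers 0 (by omega) (by omega)]
    rw [← hval]
    congr 1
  · rintro ⟨m, h1, h2, rfl⟩
    rw [List.mem_iff_getElem]
    refine ⟨m.toNat, by simp [List.length_take]; omega, ?_⟩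
    rw [List.getElem_take]
    rw [G, PySem.List.pyGetD_eq_getElem numbers 0 (by omega) (by omega)]

-- what the two while-pop loops do, as decompositions of the deque
lemma popBack_spec (numbers : List Int) (x : Int) (st : List Int) :
    ∃ suf, st = popBack numbers x st ++ suf ∧
      (∀ j ∈ suf, x ≤ PySem.List.pyGetD numbers j 0) ∧
      ∀ hne : popBack numbers x st ≠ [],
        PySem.List.pyGetD numbers ((popBack numbers x st).getLast hne) 0 < x := by
  fun_induction popBack numbers x st with
  | case1 st h =>
    have hnil : st = [] := List.getLast?_eq_none_iff.mp h
    subst hnil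
    exact ⟨[], rfl, by simp, fun hne => absurd rfl hne⟩
  | case2 st j h hcond ih =>
    obtain ⟨l', rfl⟩ := List.getLast?_eq_some_iff.mp h
    simp only [List.dropLast_concat] at ih ⊢
    obtain ⟨suf', hdec, hsuf', hlast⟩ := ih
    refine ⟨suf' ++ [j], ?_, ?_, hlast⟩
    · rw [← List.append_assoc, ← hdec]
    · intro a ha
      rcases List.mem_append.mp ha with h1 | h1
      · exact hsuf' a h1
      · rw [List.mem_singleton.mp h1]; exact hcond
  | case3 st j h hcond =>
    refine ⟨[], by simp, by simp, fun hne => ?_⟩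
    obtain ⟨l', rfl⟩ := List.getLast?_eq_some_iff.mp h
    rw [List.getLast_concat]
    omega

lemma popFront_spec (i K : Int) (st : List Int) :
    ∃ pre, st = pre ++ popFront i K st ∧ (∀ p ∈ pre, i - p > K) ∧
      (popFront i K st ≠ [] → i - (popFront i K st).headD 0 ≤ K) := by
  induction st with
  | nil => exact ⟨[], rfl, by simp, fun hne => absurd rfl hne⟩
  | cons j rest ih =>
    by_cases hc : i - j > K
    · obtain ⟨pre', hdec, hpre, hhead⟩ := ih
      refine ⟨j :: pre', ?_, ?_, ?_⟩
      · simp only [popFront, if_pos hc]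
        rw [List.cons_append, ← hdec]
      · intro p hp
        rcases List.mem_cons.mp hp with rfl | hp'
        · exact hc
        · exact hpre p hp'
      · simpa only [popFront, if_pos hc] using hhead
    · refine ⟨[], ?_, by simp, ?_⟩
      · simp only [popFront, if_neg hc, List.nil_append]
      · simp only [popFront, if_neg hc]
        intro _
        simp only [List.headD_cons]
        omega

-- along a value-increasing chain, the last element has the largest value …
lemma chain_last (numbers : List Int) (l : List Int)
    (hp : l.Pairwise (fun a b => a < b ∧ G numbers a < G numbers b))
    (hne : l ≠ []) (a : Int) (ha : a ∈ l) : G numbers a ≤ G numbers (l.getLast hne) := by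
  induction l with
  | nil => exact absurd rfl hne
  | cons h t ih =>
    rcases List.pairwise_cons.mp hp with ⟨hh, hp'⟩
    cases t with
    | nil => simp at ha; simp [ha, List.getLast]
    | cons h2 t2 =>
      rw [List.getLast_cons (by simp)]
      rcases List.mem_cons.mp ha with rfl | ha'
      · exact le_of_lt (hh _ (List.getLast_mem _)).2
      · exact ih hp' (by simp) ha'

-- … and the head the smallest
lemma chain_head (numbers : List Int) (l : List Int)
    (hp : l.Pairwise (fun a b => a < b ∧ G numbers a < G numbers b))
    (hne : l ≠ []) (a : Int) (ha : a ∈ l) : G numbers (l.headD 0) ≤ G numbers a := by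
  cases l with
  | nil => exact absurd rfl hne
  | cons h t =>
    rcases List.pairwise_cons.mp hp with ⟨hh, _⟩
    rcases List.mem_cons.mp ha with rfl | ha'
    · simp
    · exact le_of_lt (hh a ha').2

-- the deque invariant: indices in [max 0 lo, i), index- and value-increasing, and every
-- window position is dominated by some deque entry at or after it
def DQInv (numbers : List Int) (lo i : Int) (st : List Int) : Prop :=
  (∀ j ∈ st, 0 ≤ j ∧ lo ≤ j ∧ j < i) ∧
  st.Pairwise (fun a b => a < b ∧ G numbers a < G numbers b) ∧
  (∀ m, 0 ≤ m → lo ≤ m → m < i → ∃ j ∈ st, m ≤ j ∧ G numbers j ≤ G numbers m)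

lemma inv_stepFirst (numbers : List Int) (lo i : Int) (st : List Int)
    (h : DQInv numbers lo i st) (hlo : lo ≤ i) (hi : 0 ≤ i) :
    DQInv numbers lo (i + 1) (stepFirst numbers st i) := by
  obtain ⟨hA, hB, hC⟩ := h
  obtain ⟨suf, hdec, hsuf, hlast⟩ := popBack_spec numbers (PySem.List.pyGetD numbers i 0) st
  set pb := popBack numbers (PySem.List.pyGetD numbers i 0) st with hpb
  have hpbsub : List.Sublist pb st := hdec ▸ List.sublist_append_left pb suf
  have hpbmem : ∀ j ∈ pb, j ∈ st := fun j hj => hpbsub.mem hj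
  show DQInv numbers lo (i + 1) (pb ++ [i])
  refine ⟨?_, ?_, ?_⟩
  · intro j hj
    rcases List.mem_append.mp hj with h1 | h1
    · obtain ⟨a1, a2, a3⟩ := hA j (hpbmem j h1); exact ⟨a1, a2, by omega⟩
    · rw [List.mem_singleton.mp h1]; exact ⟨hi, hlo, by omega⟩
  · rw [List.pairwise_append]
    refine ⟨hB.sublist hpbsub, List.pairwise_singleton _ _, ?_⟩
    intro a ha b hb
    rw [List.mem_singleton.mp hb]
    constructor
    · exact (hA a (hpbmem a ha)).2.2
    · have hne : pb ≠ [] := List.ne_nil_of_mem ha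
      calc G numbers a ≤ G numbers (pb.getLast hne) :=
            chain_last numbers pb (hB.sublist hpbsub) hne a ha
        _ < PySem.List.pyGetD numbers i 0 := hlast hne
        _ = G numbers i := rfl
  · intro m hm0 hmlo hmi
    by_cases hmi' : m < i
    · obtain ⟨j, hj, hmj, hgj⟩ := hC m hm0 hmlo hmi'
      rw [hdec] at hj
      rcases List.mem_append.mp hj with h1 | h1
      · exact ⟨j, List.mem_append.mpr (Or.inl h1), hmj, hgj⟩
      · refine ⟨i, List.mem_append.mpr (Or.inr (by simp)), by omega, ?_⟩
        calc G numbers i ≤ G numbers j := hsuf j h1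
          _ ≤ G numbers m := hgj
    · have : m = i := by omega
      subst this
      exact ⟨m, List.mem_append.mpr (Or.inr (by simp)), le_refl _, le_refl _⟩

lemma inv_stepMain (numbers : List Int) (K i : Int) (st : List Int) (mp : Int)
    (h : DQInv numbers (i - 1 - K) i st) (hi : 0 ≤ i) (hK : 0 ≤ K) :
    DQInv numbers (i - K) (i + 1) ((stepMain numbers K (st, mp) i).1) := by
  obtain ⟨hA, hB, hC⟩ := h
  obtain ⟨suf, hdec1, hsuf, hlast⟩ := popBack_spec numbers (PySem.List.pyGetD numbers i 0) st
  set pb := popBack numbers (PySem.List.pyGetD numbers i 0) st with hpb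
  obtain ⟨pre, hdec2, hpre, hhead⟩ := popFront_spec i K pb
  set pf := popFront i K pb with hpf
  have hpbsub : List.Sublist pb st := hdec1 ▸ List.sublist_append_left pb suf
  have hpfsub : List.Sublist pf pb := hdec2 ▸ List.sublist_append_right pre pf
  have hpfst : ∀ j ∈ pf, j ∈ st := fun j hj => hpbsub.mem (hpfsub.mem hj)
  have hpfpw : pf.Pairwise (fun a b => a < b ∧ G numbers a < G numbers b) :=
    (hB.sublist hpbsub).sublist hpfsub
  have hst1 : (stepMain numbers K (st, mp) i).1 = pf ++ [i] := rfl
  rw [hst1]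
  have hpflow : ∀ j ∈ pf, i - K ≤ j := by
    intro j hj
    cases hq : pf with
    | nil => rw [hq] at hj; simp at hj
    | cons h0 t =>
      have hh0 : i - h0 ≤ K := by
        have h' := hhead (by rw [hq]; simp)
        rw [hq] at h'
        simpa using h'
      rw [hq] at hj hpfpw
      rcases List.mem_cons.mp hj with rfl | hj'
      · omega
      · have := (List.pairwise_cons.mp hpfpw).1 j hj'
        omega
  refine ⟨?_, ?_, ?_⟩
  · intro j hj
    rcases List.mem_append.mp hj with h1 | h1
    · obtain ⟨a1, _, a3⟩ := hA j (hpfst j h1)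
      exact ⟨a1, hpflow j h1, by omega⟩
    · rw [List.mem_singleton.mp h1]; exact ⟨hi, by omega, by omega⟩
  · rw [List.pairwise_append]
    refine ⟨hpfpw, List.pairwise_singleton _ _, ?_⟩
    intro a ha b hb
    rw [List.mem_singleton.mp hb]
    constructor
    · exact (hA a (hpfst a ha)).2.2
    · have hnepf : pf ≠ [] := List.ne_nil_of_mem ha
      have hnepb : pb ≠ [] := by
        intro hq; rw [hq] at hpfsub
        exact hnepf (List.sublist_nil.mp hpfsub)
      have hmem_pb : a ∈ pb := hpfsub.mem ha
      calc G numbers a ≤ G numbers (pb.getLast hnepb) :=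
            chain_last numbers pb (hB.sublist hpbsub) hnepb a hmem_pb
        _ < PySem.List.pyGetD numbers i 0 := hlast hnepb
        _ = G numbers i := rfl
  · intro m hm0 hmlo hmi
    by_cases hmi' : m < i
    · obtain ⟨j, hj, hmj, hgj⟩ := hC m hm0 (by omega) hmi'
      rw [hdec1, hdec2] at hj
      rcases List.mem_append.mp hj with h1 | h1
      · rcases List.mem_append.mp h1 with h2 | h2
        · -- j was popped from the front: i - j > K, contradicting m ≤ j and i - K ≤ m
          exfalso
          have hjlt : i - j > K := hpre j h2
          omega
        · exact ⟨j, List.mem_append.mpr (Or.inl h2), hmj, hgj⟩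
      · refine ⟨i, List.mem_append.mpr (Or.inr (by simp)), by omega, ?_⟩
        calc G numbers i ≤ G numbers j := hsuf j h1
          _ ≤ G numbers m := hgj
    · have : m = i := by omega
      subst this
      exact ⟨m, List.mem_append.mpr (Or.inr (by simp)), le_refl _, le_refl _⟩

lemma stepMain_profit (numbers : List Int) (K i : Int) (st : List Int) (mp : Int)
    (h : DQInv numbers (i - 1 - K) i st) (hK : 0 ≤ K) (hKi : K ≤ i)
    (hilen : i < (numbers.length : Int)) :
    (stepMain numbers K (st, mp) i).2 =
      max mp (PySem.List.pyGetD numbers i 0 -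
        (PySem.List.min? (PySem.List.slice numbers (some (i - K)) (some (i + 1)))
          (fun x => x)).getD 0) := by
  have hi : 0 ≤ i := by omega
  have hInv' := inv_stepMain numbers K i st mp h hi hK
  set st' := (stepMain numbers K (st, mp) i).1 with hst'
  obtain ⟨hA, hB, hC⟩ := hInv'
  have hne : st' ≠ [] := by
    have : st' = popFront i K (popBack numbers (PySem.List.pyGetD numbers i 0) st) ++ [i] := rfl
    rw [this]; simp
  have hheadmem : st'.headD 0 ∈ st' := by
    cases hq : st' with
    | nil => exact absurd hq hne
    | cons x t => simp
  obtain ⟨hh0, hhlo, hhhi⟩ := hA _ hheadmem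
  have hmin : (PySem.List.min? (PySem.List.slice numbers (some (i - K)) (some (i + 1)))
      (fun x => x)).getD 0 = G numbers (st'.headD 0) := by
    apply min_unique
    · rw [mem_slice_iff numbers (i - K) i (by omega) (by omega) hilen]
      exact ⟨st'.headD 0, by omega, by omega, rfl⟩
    · intro y hy
      rw [mem_slice_iff numbers (i - K) i (by omega) (by omega) hilen] at hy
      obtain ⟨m, hm1, hm2, rfl⟩ := hy
      obtain ⟨j, hj, hmj, hgj⟩ := hC m (by omega) (by omega) (by omega)
      exact le_trans (chain_head numbers st' hB hne j hj) hgj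
  have : (stepMain numbers K (st, mp) i).2 =
      max mp (PySem.List.pyGetD numbers i 0 - PySem.List.pyGetD numbers (st'.headD 0) 0) := rfl
  rw [this, hmin]
  rfl

lemma dqinv_shift (numbers : List Int) (K i : Int) (st : List Int)
    (h : DQInv numbers (i - K) (i + 1) st) : DQInv numbers (i + 1 - 1 - K) (i + 1) st := by
  have : i + 1 - 1 - K = i - K := by ring
  rw [this]
  exact h

lemma fold_main (numbers : List Int) (K N : Int) (hK : 0 ≤ K) (hN : N ≤ (numbers.length : Int)) :
    ∀ (c : Nat) (i : Int) (st : List Int) (mp : Int), K ≤ i → (N - i).toNat ≤ c →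
      DQInv numbers (i - 1 - K) i st →
      ((PySem.List.pyRange i N 1).foldl (stepMain numbers K) (st, mp)).2 =
        (PySem.List.pyRange i N 1).foldl
          (fun mp i => max mp (PySem.List.pyGetD numbers i 0 -
            (PySem.List.min? (PySem.List.slice numbers (some (i - K)) (some (i + 1)))
              (fun x => x)).getD 0)) mp := by
  intro c
  induction c with
  | zero =>
    intro i st mp hKi hc hInv
    rw [PySem.List.pyRange_one_eq_nil (by omega : N ≤ i)]
    simp
  | succ c ih =>
    intro i st mp hKi hc hInv
    by_cases hiN : i < N
    · rw [PySem.List.pyRange_one_cons hiN]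
      simp only [List.foldl_cons]
      have hpair : stepMain numbers K (st, mp) i =
          ((stepMain numbers K (st, mp) i).1, (stepMain numbers K (st, mp) i).2) := rfl
      rw [hpair]
      rw [ih (i + 1) (stepMain numbers K (st, mp) i).1 (stepMain numbers K (st, mp) i).2
        (by omega) (by omega)
        (dqinv_shift numbers K i _ (inv_stepMain numbers K i st mp hInv (by omega) hK))]
      rw [stepMain_profit numbers K i st mp hInv hK hKi (by omega)]
    · rw [PySem.List.pyRange_one_eq_nil (by omega : N ≤ i)]
      simp

lemma fold_first (numbers : List Int) (K : Int) :
    ∀ (c : Nat) (i : Int) (st : List Int), 0 ≤ i → i ≤ K → (K - i).toNat ≤ c →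
      DQInv numbers 0 i st →
      DQInv numbers 0 K ((PySem.List.pyRange i K 1).foldl (stepFirst numbers) st) := by
  intro c
  induction c with
  | zero =>
    intro i st h0 hiK hc hInv
    have hik : i = K := by omega
    subst hik
    rw [PySem.List.pyRange_one_eq_nil (le_refl i)]
    simpa using hInv
  | succ c ih =>
    intro i st h0 hiK hc hInv
    by_cases hik : i < K
    · rw [PySem.List.pyRange_one_cons hik]
      simp only [List.foldl_cons]
      exact ih (i + 1) _ (by omega) (by omega) (by omega)
        (inv_stepFirst numbers 0 i st hInv h0 h0)
    · have hik' : i = K := by omega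
      subst hik'
      rw [PySem.List.pyRange_one_eq_nil (le_refl i)]
      simpa using hInv

lemma dqinv_zero (numbers : List Int) : DQInv numbers 0 0 [] := by
  refine ⟨by simp, by simp, ?_⟩
  intro m h1 h2 h3
  omega

lemma dqinv_entry (numbers : List Int) (K : Int) (st : List Int)
    (h : DQInv numbers 0 K st) : DQInv numbers (K - 1 - K) K st := by
  obtain ⟨hA, hB, hC⟩ := h
  refine ⟨?_, hB, ?_⟩
  · intro j hj
    obtain ⟨a1, a2, a3⟩ := hA j hj
    exact ⟨a1, by omega, a3⟩
  · intro m hm0 hmlo hmi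
    exact hC m hm0 hm0 hmi

-- the first-window loop, with the upper bound abstracted
def gfpFoldA (numbers : List Int) (t : Int) : Int × Int :=
  (PySem.List.pyRange 1 t 1).foldl
    (fun s i => (max s.1 (PySem.List.pyGetD numbers i 0 - s.2),
                 min s.2 (PySem.List.pyGetD numbers i 0)))
    (0, PySem.List.pyGetD numbers 0 0)

def gfpTerm (numbers : List Int) (i : Int) : Int :=
  PySem.List.pyGetD numbers i 0 -
    (PySem.List.min? (PySem.List.slice numbers none (some i)) (fun x => x)).getD 0

lemma gfp_aux (numbers : List Int) (b : Int) (hb : b ≤ (numbers.length : Int)) :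
    ∀ u : Nat, 1 + (u : Int) ≤ b →
      (∀ m, 0 ≤ m → m < 1 + (u : Int) → (gfpFoldA numbers (1 + (u : Int))).2 ≤ G numbers m) ∧
      (∃ m, 0 ≤ m ∧ m < 1 + (u : Int) ∧ (gfpFoldA numbers (1 + (u : Int))).2 = G numbers m) ∧
      (gfpFoldA numbers (1 + (u : Int))).1 =
        ((PySem.List.pyRange 1 (1 + (u : Int)) 1).map (gfpTerm numbers)).foldl max 0 := by
  intro u
  induction u with
  | zero =>
    intro hub
    have hnil : PySem.List.pyRange 1 (1 + ((0 : Nat) : Int)) 1 = [] := by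
      rw [PySem.List.pyRange_one_eq_nil (by omega)]
    refine ⟨?_, ?_, ?_⟩
    · intro m h1 h2
      have hm0 : m = 0 := by omega
      subst hm0
      simp only [gfpFoldA, hnil, List.foldl_nil]
      exact le_refl _
    · exact ⟨0, le_refl 0, by omega, by simp only [gfpFoldA, hnil, List.foldl_nil]; rfl⟩
    · simp only [gfpFoldA, hnil, List.foldl_nil, List.map_nil]
  | succ u ih =>
    intro hub
    have hcast : (((u : Nat) + 1 : Nat) : Int) = (u : Int) + 1 := by push_cast; ring
    have hsplit : (1 : Int) + (((u : Nat) + 1 : Nat) : Int) = (1 + (u : Int)) + 1 := by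
      rw [hcast]; ring
    rw [hsplit]
    set t : Int := 1 + (u : Int) with ht
    have htb : t + 1 ≤ b := by rw [ht]; omega
    have htlen : t < (numbers.length : Int) := by omega
    obtain ⟨ihmin, ⟨mw, hmw0, hmwlt, hmweq⟩, ihmax⟩ := ih (by omega)
    have hrange : PySem.List.pyRange 1 (t + 1) 1 = PySem.List.pyRange 1 t 1 ++ [t] :=
      PySem.List.pyRange_one_succ_right (by omega)
    have hfold : gfpFoldA numbers (t + 1) =
        (max (gfpFoldA numbers t).1 (PySem.List.pyGetD numbers t 0 - (gfpFoldA numbers t).2),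
         min (gfpFoldA numbers t).2 (PySem.List.pyGetD numbers t 0)) := by
      rw [gfpFoldA, hrange, List.foldl_append]
      rfl
    have htermt : gfpTerm numbers t = PySem.List.pyGetD numbers t 0 - (gfpFoldA numbers t).2 := by
      rw [gfpTerm]
      congr 1
      rw [PySem.List.slice_to numbers (by omega)]
      apply min_unique
      · rw [mem_take_iff numbers t (by omega)]
        exact ⟨mw, hmw0, hmwlt, hmweq⟩
      · intro y hy
        rw [mem_take_iff numbers t (by omega)] at hy
        obtain ⟨m, h1, h2, rfl⟩ := hy
        exact ihmin m h1 h2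
    refine ⟨?_, ?_, ?_⟩
    · intro m h1 h2
      rw [hfold]
      by_cases hmt : m < t
      · exact le_trans (min_le_left _ _) (ihmin m h1 hmt)
      · have hmeq : m = t := by omega
        subst hmeq
        exact le_trans (min_le_right _ _) (le_refl _)
    · rcases le_total (gfpFoldA numbers t).2 (PySem.List.pyGetD numbers t 0) with hle | hle
      · refine ⟨mw, hmw0, by omega, ?_⟩
        rw [hfold]
        simp only [min_eq_left hle]
        exact hmweq
      · refine ⟨t, by omega, by omega, ?_⟩
        rw [hfold]
        simp only [min_eq_right hle]
        rfl
    · rw [hfold, hrange, List.map_append, List.foldl_append]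
      simp only [List.map_cons, List.map_nil, List.foldl_cons, List.foldl_nil]
      rw [ihmax, htermt]

lemma gfp_eq (numbers : List Int) (K : Int) :
    getFirstProfit numbers K = getFirstProfitAlt numbers K := by
  have hA : getFirstProfit numbers K = (gfpFoldA numbers (min K (numbers.length : Int))).1 := rfl
  have hB : getFirstProfitAlt numbers K =
      ((PySem.List.pyRange 1 (min K (numbers.length : Int)) 1).map (gfpTerm numbers)).foldl max 0 := by
    rw [getFirstProfitAlt]
    have : ((PySem.List.pyRange 1 (min K (numbers.length : Int)) 1).map
        (fun i => PySem.List.pyGetD numbers i 0 -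
          (PySem.List.min? (PySem.List.slice numbers none (some i)) (fun x => x)).getD 0)) =
        ((PySem.List.pyRange 1 (min K (numbers.length : Int)) 1).map (gfpTerm numbers)) := rfl
    rw [this, PySem.List.max?_id_cons]
    rfl
  rw [hA, hB]
  set b : Int := min K (numbers.length : Int) with hbdef
  have hble : b ≤ (numbers.length : Int) := min_le_right _ _
  by_cases h1 : b ≤ 1
  · rw [PySem.List.pyRange_one_eq_nil h1]
    simp [gfpFoldA, PySem.List.pyRange_one_eq_nil h1]
  · have hu : 1 + (((b - 1).toNat : Nat) : Int) = b := by omega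
    obtain ⟨_, _, h3⟩ := gfp_aux numbers b hble (b - 1).toNat (by omega)
    rw [hu] at h3
    exact h3

-- ===== VERDICT (by name: the statement is the Claim_ definition above) =====
theorem answer_spec : Claim_equal_answer := by
  intro numbers N K hdom hpre
  unfold Spec_answer
  rw [answer, answer_alt]
  by_cases h2 : (numbers.length : Int) < 2
  · rw [if_pos h2, if_pos h2]
  · rw [if_neg h2, if_neg h2]
    by_cases hKN : K ≥ N
    · rw [if_pos hKN, if_pos hKN]
      exact gfp_eq numbers K
    · rw [if_neg hKN, if_neg hKN]
      have hKNlt : K < N := by omega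
      obtain ⟨hK0, hNlen⟩ : 0 ≤ K ∧ N ≤ (numbers.length : Int) := by
        rcases hpre with h | h | h
        · omega
        · omega
        · exact h
      have hInvK : DQInv numbers 0 K ((PySem.List.pyRange 0 K 1).foldl (stepFirst numbers) []) :=
        fold_first numbers K K.toNat 0 [] (le_refl 0) hK0 (by omega) (dqinv_zero numbers)
      rw [fold_main numbers K N hK0 hNlen (N - K).toNat K _ (getFirstProfit numbers K)
        (le_refl K) (by omega) (dqinv_entry numbers K _ hInvK)]
      rw [gfp_eq numbers K]
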